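-- pv_equiv track=rewrite | github.com/ManaDork/IgnoreScope | IgnoreScope/core/case_conflict.py | find_case_conflicts
-- ===== SOURCE A (Python) =====
-- def normalize_pattern_for_comparison(pattern: str) -> str:
--     """Normalize pattern for case comparison.
--
--     Strips negation prefix and converts to lowercase.
--     """
--     p = pattern.lstrip("!")
--     return p.lower()
--
-- def find_case_conflicts(patterns: list[str]) -> list[tuple[int, int, str]]:
--     """Find patterns that conflict only due to case differences.
--
--     Detects patterns like 'Config/' vs 'config/' that would match the
--     same paths on case-insensitive filesystems (Windows).
--
--     Returns:
--         List of (index1, index2, reason) tuples.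
--     """
--     conflicts = []
--     seen_normalized: dict[str, int] = {}
--
--     for i, pattern in enumerate(patterns):
--         normalized = normalize_pattern_for_comparison(pattern)
--
--         if normalized in seen_normalized:
--             first_idx = seen_normalized[normalized]
--             if patterns[first_idx] != pattern:
--                 conflicts.append((
--                     first_idx,
--                     i,
--                     f"Case conflict: '{patterns[first_idx]}' vs '{pattern}'",
--                 ))
--         else:
--             seen_normalized[normalized] = i
--
--     return conflicts
-- ===== SOURCE B (Python) =====
-- def normalize_pattern_for_comparison(pattern: str) -> str:
--     """Normalize pattern for case comparison (strip negation prefix, lowercase)."""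
--     return pattern.lstrip("!").lower()
--
-- def find_case_conflicts(patterns):
--     """Find patterns that conflict only due to case differences.
--
--     Two-phase group-then-emit re-implementation: first group the indices by
--     normalized pattern (one pass into a dict of index lists), then for each
--     group take the first index as anchor and emit a conflict for every later
--     index whose raw pattern differs from the anchor's; finally sort the
--     conflicts by second index to restore encounter order.
--     """
--     groups: dict[str, list[int]] = {}
--     for i, p in enumerate(patterns):
--         groups.setdefault(normalize_pattern_for_comparison(p), []).append(i)
--
--     conflicts = []
--     for idxs in groups.values():
--         anchor = idxs[0]
--         ap = patterns[anchor]
--         for i in idxs[1:]: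
--             p = patterns[i]
--             if p != ap:
--                 conflicts.append((anchor, i, f"Case conflict: '{ap}' vs '{p}'"))
--     conflicts.sort(key=lambda t: t[1])
--     return conflicts
-- ===== Notes on version B (the rewrite author's own statement) =====
-- stated objective: alternative
-- what changed: A is a single interleaved pass maintaining a seen_normalized first-index dict and emitting conflicts as it scans; B is two-phase: it first groups all indices by normalized pattern into a dict of ordered index lists, then emits per group (anchor = first index of the group, one conflict per later index with a differing raw pattern) and finally sorts the conflicts by second index to restore A's encounter order.
import Mathlib
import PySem

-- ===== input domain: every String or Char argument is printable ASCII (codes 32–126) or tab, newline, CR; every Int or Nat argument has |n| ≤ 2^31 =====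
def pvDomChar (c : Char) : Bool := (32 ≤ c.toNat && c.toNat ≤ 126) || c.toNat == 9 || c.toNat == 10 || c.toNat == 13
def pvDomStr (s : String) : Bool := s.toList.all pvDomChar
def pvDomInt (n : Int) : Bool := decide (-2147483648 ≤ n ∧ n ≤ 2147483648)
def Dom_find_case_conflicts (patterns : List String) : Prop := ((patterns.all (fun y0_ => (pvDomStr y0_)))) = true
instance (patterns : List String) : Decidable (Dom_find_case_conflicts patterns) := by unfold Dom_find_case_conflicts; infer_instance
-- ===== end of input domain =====

-- B replaces A's interleaved seen-dict single pass by a two-phase group-then-emit: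
-- group indices by normalized pattern, emit conflicts per group against the group's
-- first index, then sort by second index (objective: alternative decomposition,
-- same return value).

-- ===== PORT A =====

-- shared module helper: pattern.lstrip("!").lower()
-- (lstrip("!") is ported by hand as dropWhile on the leading '!' characters — exact)
def normalize_pattern_for_comparison (pattern : String) : String :=
  let p := String.ofList (pattern.toList.dropWhile (fun c => c == '!'))
  PySem.Str.lower p

-- body of A's for-loop: state = (conflicts, seen_normalized)
def pvAStep (patterns : List String)
    (st : List (Int × Int × String) × PySem.Dict String Int) (ip : Int × String) :
    List (Int × Int × String) × PySem.Dict String Int :=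
  let normalized := normalize_pattern_for_comparison ip.2
  match st.2.get? normalized with
  | some first_idx =>
      -- patterns[first_idx] (always in range; getD "" is never taken)
      let fp := (PySem.List.pyGet? patterns first_idx).getD ""
      if fp ≠ ip.2 then
        (st.1 ++ [(first_idx, ip.1, "Case conflict: '" ++ fp ++ "' vs '" ++ ip.2 ++ "'")], st.2)
      else (st.1, st.2)
  | none => (st.1, st.2.insert normalized ip.1)

def find_case_conflicts (patterns : List String) : List (Int × Int × String) :=
  ((PySem.List.enumerate patterns).foldl (pvAStep patterns)
    ([], PySem.Dict.empty)).1

-- ===== PORT B =====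

-- phase 1: groups.setdefault(normalize(p), []).append(i)  =  groups[n] = groups.get(n, []) + [i]
def pvBGroups (patterns : List String) : PySem.Dict String (List Int) :=
  (PySem.List.enumerate patterns).foldl
    (fun d ip => d.modify (normalize_pattern_for_comparison ip.2) [] (fun l => l ++ [ip.1]))
    PySem.Dict.empty

-- phase 2, body of the per-group loop (anchor = idxs[0]; group lists are never empty,
-- so Python's idxs[0] never raises; the [] branch is unreachable)
def pvBEmit (patterns : List String)
    (out : List (Int × Int × String)) (idxs : List Int) : List (Int × Int × String) :=
  match idxs with
  | [] => out
  | a :: rest =>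
      let ap := (PySem.List.pyGet? patterns a).getD ""
      rest.foldl (fun o i =>
        let p := (PySem.List.pyGet? patterns i).getD ""
        if p ≠ ap then o ++ [(a, i, "Case conflict: '" ++ ap ++ "' vs '" ++ p ++ "'")] else o)
        out

def find_case_conflicts_alt (patterns : List String) : List (Int × Int × String) :=
  let groups := pvBGroups patterns
  let conflicts := groups.values.foldl (pvBEmit patterns) []
  PySem.List.sorted conflicts (fun t => t.2.1) false

-- ===== PRECONDITION & SPEC =====
def Spec_find_case_conflicts (patterns : List String) (out : List (Int × Int × String)) : Prop := out = find_case_conflicts_alt patterns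
instance (patterns : List String) (out : List (Int × Int × String)) : Decidable (Spec_find_case_conflicts patterns out) := by unfold Spec_find_case_conflicts; infer_instance

-- ===== CLAIM (what is proved, stated in full; the proofs are below) =====
def Claim_equal_find_case_conflicts : Prop := ∀ (patterns : List String), Dom_find_case_conflicts patterns → Spec_find_case_conflicts patterns (find_case_conflicts patterns)

-- ===== LEMMAS AND PROOFS =====

-- abbreviations used only by the proofs
def pvPat (patterns : List String) (i : Int) : String :=
  (PySem.List.pyGet? patterns i).getD ""

def pvMsg (a b : String) : String := "Case conflict: '" ++ a ++ "' vs '" ++ b ++ "'"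

-- first index of normalized form n
def pvJ (norms : List String) (n : String) : Nat :=
  (PySem.List.index? norms n).getD 0

-- the common reference list: A's conflicts, in encounter order, as filter+map
def pvCond (patterns norms : List String) (ip : Int × String) : Bool :=
  decide ((pvJ norms (normalize_pattern_for_comparison ip.2) : Int) < ip.1 ∧
    pvPat patterns (pvJ norms (normalize_pattern_for_comparison ip.2)) ≠ ip.2)

def pvOut (patterns norms : List String) (ip : Int × String) : Int × Int × String :=
  ((pvJ norms (normalize_pattern_for_comparison ip.2) : Int), ip.1,
    pvMsg (pvPat patterns (pvJ norms (normalize_pattern_for_comparison ip.2))) ip.2)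

def pvS (patterns : List String) : List (Int × Int × String) :=
  (((PySem.List.enumerate patterns).filter
      (pvCond patterns (patterns.map normalize_pattern_for_comparison))).map
    (pvOut patterns (patterns.map normalize_pattern_for_comparison)))

-- A's conflicts re-expressed as a stateless fold (the intermediate form the old-style
-- invariant proof targets)
def pvSpecStep (patterns : List String) (norms : List String)
    (out : List (Int × Int × String)) (x : Int × (String × String)) :
    List (Int × Int × String) :=
  match PySem.List.index? norms x.2.2 with
  | some j =>
      if (j : Int) < x.1 ∧ (PySem.List.pyGet? patterns (j : Int)).getD "" ≠ x.2.1 then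
        out ++ [((j : Int), x.1,
          "Case conflict: '" ++ (PySem.List.pyGet? patterns (j : Int)).getD "" ++ "' vs '" ++ x.2.1 ++ "'")]
      else out
  | none => out

-- first occurrence in l ++ v :: t when v ∉ l
theorem pv_index?_append_cons_self {α : Type} [BEq α] [LawfulBEq α]
    (l t : List α) (v : α) (hv : v ∉ l) :
    PySem.List.index? (l ++ v :: t) v = some l.length := by
  induction l with
  | nil => rw [List.nil_append, PySem.List.index?_cons_self]; rfl
  | cons x xs ih =>
      have hx : x ≠ v := by intro h; exact hv (by simp [h])
      have hv' : v ∉ xs := fun h => hv (List.mem_cons_of_mem _ h)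
      rw [List.cons_append, PySem.List.index?_cons_of_ne _ hx, ih hv']
      simp

-- main loop invariant: processing the suffix `rest` after prefix `pre`, with A's dict
-- holding exactly the first occurrences of the normalized prefix, A's fold and the
-- stateless spec fold extend the accumulator identically.
theorem pv_loop_eq (patterns : List String) :
    ∀ (rest pre : List String) (acc : List (Int × Int × String)) (d : PySem.Dict String Int),
      patterns = pre ++ rest →
      (∀ m, d.get? m =
        (PySem.List.index? (pre.map normalize_pattern_for_comparison) m).map (fun k => (k : Int))) →
      ((PySem.List.enumerate rest (pre.length : Int)).foldl (pvAStep patterns) (acc, d)).1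
        = (PySem.List.enumerate (rest.zip (rest.map normalize_pattern_for_comparison)) (pre.length : Int)).foldl
            (pvSpecStep patterns (patterns.map normalize_pattern_for_comparison)) acc := by
  intro rest
  induction rest with
  | nil => intro pre acc d hsplit hinv; simp [PySem.List.enumerate]
  | cons p rest ih =>
      intro pre acc d hsplit hinv
      set f := normalize_pattern_for_comparison with hf
      rw [List.map_cons, List.zip_cons_cons, PySem.List.enumerate_cons, PySem.List.enumerate_cons]
      simp only [List.foldl_cons]
      have hnorms : patterns.map f = pre.map f ++ f p :: rest.map f := by
        rw [hsplit]; simp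
      by_cases hmem : f p ∈ pre.map f
      · -- normalized already seen
        obtain ⟨k, hk⟩ : ∃ k, PySem.List.index? (pre.map f) (f p) = some k := by
          have := PySem.List.index?_isSome_iff (xs := pre.map f) (v := f p)
          cases h : PySem.List.index? (pre.map f) (f p) with
          | none => rw [h] at this; simp [hmem] at this
          | some k => exact ⟨k, rfl⟩
        obtain ⟨hklt, -, -⟩ := PySem.List.getElem_of_index?_eq_some hk
        have hkltl : k < pre.length := by simpa using hklt
        have hgetA : d.get? (f p) = some (k : Int) := by rw [hinv, hk]; rfl
        have hgetB : PySem.List.index? (patterns.map f) (f p) = some k := by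
          rw [hnorms, PySem.List.index?_append_of_mem _ hmem, hk]
        have hstepA : pvAStep patterns (acc, d) ((pre.length : Int), p)
            = (pvSpecStep patterns (patterns.map f) acc ((pre.length : Int), p, f p), d) := by
          simp only [pvAStep, pvSpecStep, ← hf, hgetA, hgetB]
          split_ifs with h1 h2 h2
          · rfl
          · exact absurd ⟨by exact_mod_cast hkltl, h1⟩ h2
          · exact absurd h2.2 h1
          · rfl
        rw [hstepA]
        have : (pre.length : Int) + 1 = ((pre ++ [p]).length : Int) := by simp
        rw [this]
        apply ih (pre ++ [p]) _ d (by rw [hsplit]; simp)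
        -- invariant is preserved: dict unchanged, f p already in the prefix
        intro m
        rw [hinv m, List.map_append, List.map_singleton]
        by_cases hm : m ∈ pre.map f
        · rw [PySem.List.index?_append_of_mem _ hm]
        · have hmne : m ≠ f p := fun h => hm (h ▸ hmem)
          have h1 : PySem.List.index? (pre.map f) m = none :=
            (PySem.List.index?_eq_none_iff _ _).mpr hm
          have h2 : PySem.List.index? (pre.map f ++ [f p]) m = none := by
            rw [PySem.List.index?_eq_none_iff]
            simp [hm, hmne]
          rw [h1, h2]
      · -- normalized not seen yet: A inserts, the spec fold finds j = i (no emission)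
        have hgetA : d.get? (f p) = none := by
          rw [hinv, (PySem.List.index?_eq_none_iff _ _).mpr hmem]; rfl
        have hgetB : PySem.List.index? (patterns.map f) (f p) = some pre.length := by
          rw [hnorms]
          have := pv_index?_append_cons_self (pre.map f) (rest.map f) (f p) hmem
          simpa using this
        have hstepA : pvAStep patterns (acc, d) ((pre.length : Int), p)
            = (acc, d.insert (f p) (pre.length : Int)) := by
          simp [pvAStep, ← hf, hgetA]
        have hstepB : pvSpecStep patterns (patterns.map f) acc ((pre.length : Int), p, f p) = acc := by
          simp only [pvSpecStep]
          rw [hgetB]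
          simp
        rw [hstepA, hstepB]
        have : (pre.length : Int) + 1 = ((pre ++ [p]).length : Int) := by simp
        rw [this]
        apply ih (pre ++ [p]) _ (d.insert (f p) (pre.length : Int)) (by rw [hsplit]; simp)
        intro m
        rw [List.map_append, List.map_singleton]
        by_cases hm : m = f p
        · subst hm
          rw [PySem.Dict.get?_insert_self,
              PySem.List.index?_append_singleton_self _ _ hmem]
          simp
        · rw [PySem.Dict.get?_insert_of_ne d _ hm, hinv m]
          by_cases hm' : m ∈ pre.map f
          · rw [PySem.List.index?_append_of_mem _ hm']
          · have h1 : PySem.List.index? (pre.map f) m = none :=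
              (PySem.List.index?_eq_none_iff _ _).mpr hm'
            have h2 : PySem.List.index? (pre.map f ++ [f p]) m = none := by
              rw [PySem.List.index?_eq_none_iff]
              simp [hm', hm]
            rw [h1, h2]

-- enumerate of zip-with-map, as a map over enumerate
theorem pv_enum_zip_map {α β : Type} (g : α → β) :
    ∀ (l : List α) (s : Int),
      PySem.List.enumerate (l.zip (l.map g)) s
        = (PySem.List.enumerate l s).map (fun ip => (ip.1, ip.2, g ip.2)) := by
  intro l
  induction l with
  | nil => intro s; simp [PySem.List.enumerate]
  | cons x xs ih =>
      intro s
      rw [List.map_cons, List.zip_cons_cons, PySem.List.enumerate_cons,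
        PySem.List.enumerate_cons, List.map_cons, ih]

-- the stateless spec fold is pvS
theorem pv_specfold_eq_S (patterns : List String) :
    (PySem.List.enumerate (patterns.zip (patterns.map normalize_pattern_for_comparison))).foldl
      (pvSpecStep patterns (patterns.map normalize_pattern_for_comparison)) []
      = pvS patterns := by
  rw [pv_enum_zip_map, List.foldl_map]
  have hcongr : ∀ (acc : List (Int × Int × String)) (ip : Int × String),
      ip ∈ PySem.List.enumerate patterns →
      pvSpecStep patterns (patterns.map normalize_pattern_for_comparison) acc
          (ip.1, ip.2, normalize_pattern_for_comparison ip.2)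
        = if pvCond patterns (patterns.map normalize_pattern_for_comparison) ip then
            acc ++ [pvOut patterns (patterns.map normalize_pattern_for_comparison) ip]
          else acc := by
    intro acc ip hip
    have hp : ip.2 ∈ patterns := by
      have := List.mem_map_of_mem (f := Prod.snd) hip
      rwa [PySem.List.map_snd_enumerate] at this
    have hmem : normalize_pattern_for_comparison ip.2
        ∈ patterns.map normalize_pattern_for_comparison := List.mem_map_of_mem hp
    obtain ⟨j, hj⟩ : ∃ j, PySem.List.index?
        (patterns.map normalize_pattern_for_comparison)
        (normalize_pattern_for_comparison ip.2) = some j := by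
      have := PySem.List.index?_isSome_iff
        (xs := patterns.map normalize_pattern_for_comparison)
        (v := normalize_pattern_for_comparison ip.2)
      cases h : PySem.List.index? (patterns.map normalize_pattern_for_comparison)
          (normalize_pattern_for_comparison ip.2) with
      | none => rw [h] at this; simp [hmem] at this
      | some j => exact ⟨j, rfl⟩
    have hJ : pvJ (patterns.map normalize_pattern_for_comparison)
        (normalize_pattern_for_comparison ip.2) = j := by unfold pvJ; rw [hj]; rfl
    simp only [pvSpecStep, hj, pvCond, pvOut, pvPat, pvMsg, hJ]
    by_cases hc : ((j : Int) < ip.1 ∧ (PySem.List.pyGet? patterns (j : Int)).getD "" ≠ ip.2)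
    · simp [hc]
    · simp
  rw [PySem.List.foldl_congr_mem _ _ _ _ hcongr,
    PySem.List.foldl_append_if (pvCond patterns (patterns.map normalize_pattern_for_comparison))
      (pvOut patterns (patterns.map normalize_pattern_for_comparison))]
  simp [pvS]

theorem pv_A_eq_S (patterns : List String) : find_case_conflicts patterns = pvS patterns := by
  rw [← pv_specfold_eq_S]
  unfold find_case_conflicts
  exact pv_loop_eq patterns patterns [] [] PySem.Dict.empty (by simp)
    (by intro m; simp [PySem.Dict.get?_empty, PySem.List.index?])

-- the list a group emission appends (closed form of pvBEmit's contribution)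
def pvEmitList (patterns : List String) (idxs : List Int) : List (Int × Int × String) :=
  match idxs with
  | [] => []
  | a :: rest =>
      (rest.filter (fun i => decide (pvPat patterns i ≠ pvPat patterns a))).map
        (fun i => (a, i, pvMsg (pvPat patterns a) (pvPat patterns i)))

theorem pv_bemit_eq (patterns : List String) (out : List (Int × Int × String)) (idxs : List Int) :
    pvBEmit patterns out idxs = out ++ pvEmitList patterns idxs := by
  cases idxs with
  | nil => simp [pvBEmit, pvEmitList]
  | cons a rest =>
      simp only [pvBEmit, pvEmitList]
      rw [PySem.List.foldl_append_ite
        (fun i => (PySem.List.pyGet? patterns i).getD "" ≠ (PySem.List.pyGet? patterns a).getD "")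
        (fun i => (a, i, "Case conflict: '" ++ (PySem.List.pyGet? patterns a).getD "" ++ "' vs '"
          ++ (PySem.List.pyGet? patterns i).getD "" ++ "'"))]
      simp [pvPat, pvMsg]

-- group lookup: the ordered indices whose normalized pattern is k
theorem pv_groups_getD (patterns : List String) (k : String) :
    (pvBGroups patterns).getD k []
      = ((PySem.List.enumerate patterns).filter
          (fun ip => normalize_pattern_for_comparison ip.2 == k)).map (fun ip => ip.1) := by
  unfold pvBGroups
  have h1 : (PySem.List.enumerate patterns).foldl
      (fun (d : PySem.Dict String (List Int)) ip =>
        d.modify (normalize_pattern_for_comparison ip.2) [] (fun l => l ++ [ip.1]))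
      PySem.Dict.empty
      = ((PySem.List.enumerate patterns).map
          (fun ip => (normalize_pattern_for_comparison ip.2, ip.1))).foldl
          (fun (d : PySem.Dict String (List Int)) p => d.modify p.1 [] (fun l => l ++ [p.2]))
          PySem.Dict.empty := by rw [List.foldl_map]
  rw [h1, PySem.Dict.getD_foldl_modify_append, List.filter_map, List.map_map]
  simp [Function.comp_def]

theorem pv_groups_keys (patterns : List String) :
    (pvBGroups patterns).keys
      = PySem.Set.ofList ((PySem.List.enumerate patterns).map
          (fun ip => normalize_pattern_for_comparison ip.2)) := by
  unfold pvBGroups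
  have h2 := PySem.Dict.keys_foldl_modify_key (PySem.List.enumerate patterns)
    (fun ip => normalize_pattern_for_comparison ip.2) ([] : List Int)
    (fun _ ip l => l ++ [ip.1]) PySem.Dict.empty
  rw [h2]
  simp [PySem.Dict.keys_empty, PySem.Set.update, PySem.Set.ofList_eq_foldl]

theorem pv_groups_nodup (patterns : List String) : (pvBGroups patterns).keys.Nodup := by
  unfold pvBGroups
  exact PySem.Dict.nodup_keys_foldl_modify_key _ _ _ _ _ (by simp [PySem.Dict.keys_empty])

-- head of the group of k sits at the first index of k in the normalized list
theorem pv_filter_enum_head (g : String → String) (l : List String) :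
    ∀ (s : Int) (k : String) (j : Nat),
      PySem.List.index? (l.map g) k = some j →
      ∃ (hj : j < l.length) (gt : List (Int × String)),
        (PySem.List.enumerate l s).filter (fun ip => g ip.2 == k)
          = (s + (j : Int), l[j]) :: gt := by
  induction l with
  | nil => intro s k j h; rw [List.map_nil] at h; simp [PySem.List.index?_eq_idxOf?] at h
  | cons x xs ih =>
      intro s k j h
      rw [List.map_cons] at h
      by_cases hgx : g x = k
      · rw [hgx, PySem.List.index?_cons_self] at h
        have hj0 : j = 0 := (Option.some.inj h).symm
        subst hj0
        refine ⟨by simp, (PySem.List.enumerate xs (s+1)).filter (fun ip => g ip.2 == k), ?_⟩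
        rw [PySem.List.enumerate_cons, List.filter_cons]
        simp [hgx]
      · rw [PySem.List.index?_cons_of_ne _ hgx] at h
        obtain ⟨j', hj', rfl⟩ : ∃ j', PySem.List.index? (xs.map g) k = some j' ∧ j = j' + 1 := by
          cases h' : PySem.List.index? (xs.map g) k with
          | none => rw [h'] at h; simp at h
          | some j' => rw [h'] at h; simp at h; exact ⟨j', rfl, h.symm⟩
        obtain ⟨hlt, gt, hgt⟩ := ih (s + 1) k j' hj'
        refine ⟨by simpa using Nat.succ_lt_succ hlt, gt, ?_⟩
        rw [PySem.List.enumerate_cons, List.filter_cons_of_neg (by simp [hgx]), hgt]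
        congr 2
        omega

-- partition of a list by its key values, as a permutation
theorem pv_perm_partition {α κ : Type} [BEq κ] [LawfulBEq κ] (key : α → κ) :
    ∀ (ks : List κ) (l : List α), ks.Nodup → (∀ x ∈ l, key x ∈ ks) →
      l.Perm (ks.flatMap (fun k => l.filter (fun x => key x == k))) := by
  intro ks
  induction ks with
  | nil =>
      intro l _ h
      have hl : l = [] := List.eq_nil_iff_forall_not_mem.mpr (fun x hx => by simpa using h x hx)
      subst hl; simp
  | cons k ks ih =>
      intro l hnd h
      have hk_not : k ∉ ks := (List.nodup_cons.mp hnd).1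
      have hnd' : ks.Nodup := (List.nodup_cons.mp hnd).2
      have hmem' : ∀ x ∈ l.filter (fun x => !(key x == k)), key x ∈ ks := by
        intro x hx
        have hx1 := List.mem_of_mem_filter hx
        have hx2 := List.of_mem_filter hx
        simp only [Bool.not_eq_eq_eq_not, Bool.not_true, beq_eq_false_iff_ne, ne_eq] at hx2
        rcases List.mem_cons.mp (h x hx1) with h1 | h1
        · exact absurd h1 hx2
        · exact h1
      have hperm' := ih (l.filter (fun x => !(key x == k))) hnd' hmem'
      have hgroups : ks.flatMap (fun k' => (l.filter (fun x => !(key x == k))).filter (fun x => key x == k'))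
          = ks.flatMap (fun k' => l.filter (fun x => key x == k')) := by
        rw [List.flatMap_def, List.flatMap_def]
        apply congrArg
        apply List.map_congr_left
        intro k' hk'
        rw [List.filter_filter]
        apply List.filter_congr
        intro x _
        by_cases hxk : key x = k'
        · have hkk : k' ≠ k := fun hh => hk_not (hh ▸ hk')
          simp [hxk, hkk]
        · simp [hxk]
      rw [List.flatMap_cons]
      rw [hgroups] at hperm'
      exact ((List.filter_append_perm (fun x => key x == k) l).symm).trans
        (List.Perm.append_left _ hperm')

theorem pv_mem_enum_pat (patterns : List String) (ip : Int × String)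
    (hip : ip ∈ PySem.List.enumerate patterns) : pvPat patterns ip.1 = ip.2 := by
  obtain ⟨n, hn, rfl⟩ := (PySem.List.mem_enumerate_iff patterns 0 ip).mp hip
  simp [pvPat, hn]

-- the emission of one group equals the group's contribution to the reference list
theorem pv_emit_group_eq (patterns : List String) (k : String) (j : Nat)
    (hj : PySem.List.index? (patterns.map normalize_pattern_for_comparison) k = some j) :
    pvEmitList patterns
        (((PySem.List.enumerate patterns).filter
            (fun ip => normalize_pattern_for_comparison ip.2 == k)).map (fun ip => ip.1))
      = (((PySem.List.enumerate patterns).filter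
            (fun ip => normalize_pattern_for_comparison ip.2 == k)).filter
            (pvCond patterns (patterns.map normalize_pattern_for_comparison))).map
          (pvOut patterns (patterns.map normalize_pattern_for_comparison)) := by
  obtain ⟨hjlt, gt, hgt⟩ :=
    pv_filter_enum_head normalize_pattern_for_comparison patterns 0 k j hj
  have hjlt' : j < patterns.length := by simpa using hjlt
  have hJ : pvJ (patterns.map normalize_pattern_for_comparison) k = j := by
    unfold pvJ; rw [hj]; rfl
  have hpatj : pvPat patterns ((j : Nat) : Int) = patterns[j] := by
    simp [pvPat, hjlt']
  have hnormj : normalize_pattern_for_comparison patterns[j] = k := by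
    obtain ⟨hk1, hk2, -⟩ := PySem.List.getElem_of_index?_eq_some hj
    simpa using hk2
  have hpair : ((PySem.List.enumerate patterns).filter
      (fun ip => normalize_pattern_for_comparison ip.2 == k)).Pairwise
        (fun (a b : Int × String) => a.1 < b.1) :=
    (PySem.List.pairwise_lt_enumerate patterns 0).filter _
  rw [hgt] at hpair
  have hgtlt : ∀ ip ∈ gt, (j : Int) < ip.1 := by
    intro ip hip
    have := (List.pairwise_cons.mp hpair).1 ip hip
    simpa using this
  have hgtfacts : ∀ ip ∈ gt,
      normalize_pattern_for_comparison ip.2 = k ∧ pvPat patterns ip.1 = ip.2 := by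
    intro ip hip
    have hmem : ip ∈ (PySem.List.enumerate patterns).filter
        (fun ip => normalize_pattern_for_comparison ip.2 == k) := by
      rw [hgt]; exact List.mem_cons_of_mem _ hip
    exact ⟨by simpa using List.of_mem_filter hmem,
      pv_mem_enum_pat patterns ip (List.mem_of_mem_filter hmem)⟩
  rw [hgt]
  rw [List.filter_cons_of_neg (by simp [pvCond, hnormj, hJ])]
  simp only [List.map_cons, pvEmitList, zero_add]
  rw [List.filter_map, List.map_map]
  have hfil : gt.filter ((fun i => decide (pvPat patterns i ≠ pvPat patterns (j : Int)))
        ∘ (fun (ip : Int × String) => ip.1))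
      = gt.filter (pvCond patterns (patterns.map normalize_pattern_for_comparison)) := by
    apply List.filter_congr
    intro ip hip
    obtain ⟨hn, hp⟩ := hgtfacts ip hip
    simp only [Function.comp_apply, pvCond, hn, hJ, hp, hpatj]
    have hlt := hgtlt ip hip
    simp [hlt, ne_comm]
  rw [hfil]
  apply List.map_congr_left
  intro ip hip
  have hip' : ip ∈ gt := List.mem_of_mem_filter hip
  obtain ⟨hn, hp⟩ := hgtfacts ip hip'
  simp only [Function.comp_apply, pvOut, hn, hJ, hp, hpatj]

-- B's fold over the groups, flattened
set_option maxHeartbeats 1000000 in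
theorem pv_B_eq_S (patterns : List String) :
    find_case_conflicts_alt patterns = pvS patterns := by
  show PySem.List.sorted ((pvBGroups patterns).values.foldl (pvBEmit patterns) [])
      (fun t => t.2.1) false = pvS patterns
  rw [PySem.List.foldl_congr_mem (pvBGroups patterns).values (pvBEmit patterns)
      (fun out idxs => out ++ pvEmitList patterns idxs) []
      (fun acc x _ => pv_bemit_eq patterns acc x),
    PySem.List.foldl_append_eq_flatMap]
  rw [PySem.Dict.values_eq_map_keys (pvBGroups patterns) (pv_groups_nodup patterns) [],
    List.flatMap_map, pv_groups_keys]
  have hEmap : (PySem.List.enumerate patterns).map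
      (fun ip => normalize_pattern_for_comparison ip.2)
      = patterns.map normalize_pattern_for_comparison := by
    rw [show (fun (ip : Int × String) => normalize_pattern_for_comparison ip.2)
        = normalize_pattern_for_comparison ∘ Prod.snd from rfl, ← List.map_map,
      PySem.List.map_snd_enumerate]
  rw [hEmap]
  have hflat : (PySem.Set.ofList (patterns.map normalize_pattern_for_comparison)).flatMap
        (fun k => pvEmitList patterns ((pvBGroups patterns).getD k []))
      = (PySem.Set.ofList (patterns.map normalize_pattern_for_comparison)).flatMap
        (fun k => (((PySem.List.enumerate patterns).filter
            (fun ip => normalize_pattern_for_comparison ip.2 == k)).filter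
            (pvCond patterns (patterns.map normalize_pattern_for_comparison))).map
          (pvOut patterns (patterns.map normalize_pattern_for_comparison))) := by
    rw [List.flatMap_def, List.flatMap_def]
    apply congrArg
    apply List.map_congr_left
    intro k hk
    have hk' : k ∈ patterns.map normalize_pattern_for_comparison :=
      (PySem.Set.mem_ofList _ _).mp hk
    obtain ⟨j, hj⟩ : ∃ j, PySem.List.index?
        (patterns.map normalize_pattern_for_comparison) k = some j := by
      have := PySem.List.index?_isSome_iff
        (xs := patterns.map normalize_pattern_for_comparison) (v := k)
      cases h : PySem.List.index? (patterns.map normalize_pattern_for_comparison) k with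
      | none => rw [h] at this; simp [hk'] at this
      | some j => exact ⟨j, rfl⟩
    rw [pv_groups_getD, pv_emit_group_eq patterns k j hj]
  rw [hflat]
  -- the flattened emissions are a permutation of the reference list pvS
  have hpartition : (PySem.List.enumerate patterns).Perm
      ((PySem.Set.ofList (patterns.map normalize_pattern_for_comparison)).flatMap
        (fun k => (PySem.List.enumerate patterns).filter
          (fun ip => normalize_pattern_for_comparison ip.2 == k))) := by
    have h := pv_perm_partition (fun (ip : Int × String) => normalize_pattern_for_comparison ip.2)
      (PySem.Set.ofList (patterns.map normalize_pattern_for_comparison))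
      (PySem.List.enumerate patterns)
    exact h (PySem.Set.nodup_ofList _)
      (fun x hx => by
        rw [PySem.Set.mem_ofList, ← hEmap]
        exact List.mem_map_of_mem hx)
  have hperm : (pvS patterns).Perm
      ((PySem.Set.ofList (patterns.map normalize_pattern_for_comparison)).flatMap
        (fun k => (((PySem.List.enumerate patterns).filter
            (fun ip => normalize_pattern_for_comparison ip.2 == k)).filter
            (pvCond patterns (patterns.map normalize_pattern_for_comparison))).map
          (pvOut patterns (patterns.map normalize_pattern_for_comparison)))) := by
    have h1 := (hpartition.filter
      (pvCond patterns (patterns.map normalize_pattern_for_comparison))).map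
      (pvOut patterns (patterns.map normalize_pattern_for_comparison))
    unfold pvS
    rw [List.filter_flatMap, List.map_flatMap] at h1
    exact h1
  have hpairS : (pvS patterns).Pairwise (fun a b => a.2.1 < b.2.1) := by
    unfold pvS
    rw [List.pairwise_map]
    apply List.Pairwise.imp ?_ ((PySem.List.pairwise_lt_enumerate patterns 0).filter _)
    intro a b hab
    simpa [pvOut] using hab
  exact PySem.List.sorted_eq_of_perm_of_pairwise_lt _ _ _ hperm hpairS

-- ===== VERDICT (by name: the statement is the Claim_ definition above) =====
theorem find_case_conflicts_spec : Claim_equal_find_case_conflicts := by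
  intro patterns _
  unfold Spec_find_case_conflicts
  rw [pv_A_eq_S, pv_B_eq_S]
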